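-- pv_equiv track=rewrite | github.com/adanzl/leetcode-practice | py/q2700/Q2732.py | goodSubsetofBinaryMatrix
-- ===== SOURCE A (Python) =====
-- from collections import defaultdict
-- from typing import List
--
-- def goodSubsetofBinaryMatrix(grid: List[List[int]]) -> List[int]:
--     m, n = len(grid), len(grid[0])
--     states = defaultdict(list)
--     for i in range(m):
--         tmp = 0
--         for j in range(n):
--             tmp = tmp * 2 + grid[i][j]
--
--         states[tmp].append(i)
--
--     # 贪心，开选
--     res = []
--     if states[0]:
--         return states[0]
--
--     tgt = 1 << n
--     ss = tgt - 1
--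
--     # 枚举第一行
--     for lstate in range(tgt):
--         if not states[lstate]:
--             continue
--
--         # 补集
--         rstate = ss ^ lstate
--
--         s = rstate
--         # 获取补集的所有子集
--         while s:
--             if states[s]:
--                 res = [states[lstate][0], states[s][0]]
--                 res.sort()
--                 return res
--             s = (s - 1) & rstate
--     return []
-- ===== SOURCE B (Python) =====
-- from typing import List
--
-- def goodSubsetofBinaryMatrix(grid: List[List[int]]) -> List[int]:
--     n = len(grid[0])
--     first = {}          # row-state -> first row index with that state
--     zeros = []          # all rows whose state is 0
--     for i, row in enumerate(grid):
--         mask = 0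
--         for j in range(n):
--             mask = mask * 2 + row[j]
--         if mask == 0:
--             zeros.append(i)
--         if mask not in first:
--             first[mask] = i
--     if zeros:
--         return zeros
--     keys = sorted(k for k in first if 0 < k < (1 << n))
--     for L in keys:                      # smallest usable left state first
--         for R in reversed(keys):        # largest disjoint partner first
--             if L & R == 0:
--                 return sorted([first[L], first[R]])
--     return []
-- ===== Notes on version B (the rewrite author's own statement) =====
-- stated objective: faster
-- what changed: B keeps the first pass (bitmask per row, all-zero-row early return) but replaces A's enumeration over all 2^n left states plus 3^n complement-submask descent by a direct pairwise-disjointness scan over the sorted distinct row states that actually occur (left state ascending, partner descending).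
import Mathlib
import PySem

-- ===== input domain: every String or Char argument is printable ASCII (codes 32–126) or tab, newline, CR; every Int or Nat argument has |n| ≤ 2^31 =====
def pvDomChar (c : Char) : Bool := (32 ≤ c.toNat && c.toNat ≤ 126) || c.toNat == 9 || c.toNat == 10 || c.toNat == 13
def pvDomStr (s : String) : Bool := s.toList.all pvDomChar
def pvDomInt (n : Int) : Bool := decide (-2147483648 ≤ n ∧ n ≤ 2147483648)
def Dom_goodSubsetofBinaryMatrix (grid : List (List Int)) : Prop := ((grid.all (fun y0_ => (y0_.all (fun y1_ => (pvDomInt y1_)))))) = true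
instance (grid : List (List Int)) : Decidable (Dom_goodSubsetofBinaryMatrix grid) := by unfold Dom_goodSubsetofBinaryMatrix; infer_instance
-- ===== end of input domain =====

-- B replaces A's 2^n-state loop with 3^n submask descent by a direct pairwise-disjointness
-- scan over the distinct row states that actually occur (sorted ascending for the left
-- state, descending for the partner) — measurably faster on large inputs.

-- ===== PORT A =====
-- both Pythons compute a row's bitmask with the same inner loop (tmp = tmp*2 + row[j])
def rowMask (n : Int) (row : List Int) : Int :=
  (PySem.List.pyRange 0 n 1).foldl (fun tmp j => tmp * 2 + PySem.List.pyGetD row j 0) 0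

-- used by innerA's termination proof
theorem band_le_left {a : Int} (b : Int) (h : 0 ≤ a) : PySem.Int.band a b ≤ a := by
  unfold PySem.Int.band
  have ha : ((a.toNat : Int)) = a := Int.toNat_of_nonneg h
  split_ifs with h1
  · have := @Nat.and_le_left a.toNat b.toNat
    omega
  · omega

-- A's inner loop: while s: if states[s]: …; s = (s-1) & rstate.
-- 'if s ≤ 0' is Python's 'while s' (s is nonnegative on every call this program makes).
def innerA (states : PySem.Dict Int (List Int)) (rstate : Int) (s : Int) : Option Int :=
  if s ≤ 0 then none
  else
    match states.getD s [] with
    | x :: _ => some x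
    | [] => innerA states rstate (PySem.Int.band (s - 1) rstate)
termination_by s.toNat
decreasing_by
  have h1 : PySem.Int.band (s - 1) rstate ≤ s - 1 := band_le_left rstate (by omega)
  have h2 : 0 ≤ PySem.Int.band (s - 1) rstate :=
    PySem.Int.band_nonneg_of_nonneg_left rstate (by omega)
  omega

-- A's outer loop over lstate in range(tgt), with the early return
def outerA (states : PySem.Dict Int (List Int)) (ss : Int) : List Int → List Int
  | [] => []
  | lstate :: rest =>
    match states.getD lstate [] with
    | [] => outerA states ss rest
    | li :: _ =>
      match innerA states (PySem.Int.bxor ss lstate) (PySem.Int.bxor ss lstate) with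
      | some si => PySem.List.sorted [li, si] (fun x => x) false
      | none => outerA states ss rest

def goodSubsetofBinaryMatrix (grid : List (List Int)) : List Int :=
  let m : Int := PySem.List.len grid
  let n : Int := PySem.List.len (PySem.List.pyGetD grid 0 [])
  let states : PySem.Dict Int (List Int) :=
    (PySem.List.pyRange 0 m 1).foldl
      (fun d i => d.modify (rowMask n (PySem.List.pyGetD grid i [])) [] (· ++ [i]))
      PySem.Dict.empty
  if (states.getD 0 []) ≠ [] then states.getD 0 []
  else
    let tgt : Int := 1 <<< n.toNat
    outerA states (tgt - 1) (PySem.List.pyRange 0 tgt 1)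

-- ===== PORT B =====
-- B's inner loop: first R (scanning the keys descending) with L & R == 0
def innerB (first : PySem.Dict Int Int) (l : Int) : List Int → Option (List Int)
  | [] => none
  | r :: rs =>
    if PySem.Int.band l r = 0 then
      some (PySem.List.sorted [first.getD l 0, first.getD r 0] (fun x => x) false)
    else innerB first l rs

-- B's outer loop over the sorted keys ascending
def outerB (first : PySem.Dict Int Int) (keysRev : List Int) : List Int → List Int
  | [] => []
  | l :: ls =>
    match innerB first l keysRev with
    | some res => res
    | none => outerB first keysRev ls

def goodSubsetofBinaryMatrix_alt (grid : List (List Int)) : List Int :=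
  let n : Int := PySem.List.len (PySem.List.pyGetD grid 0 [])
  let fz : PySem.Dict Int Int × List Int :=
    (PySem.List.enumerate grid).foldl
      (fun p ir =>
        (if p.1.contains (rowMask n ir.2) then p.1 else p.1.insert (rowMask n ir.2) ir.1,
         if rowMask n ir.2 = 0 then p.2 ++ [ir.1] else p.2))
      (PySem.Dict.empty, [])
  if fz.2 ≠ [] then fz.2
  else
    let tgt : Int := 1 <<< n.toNat
    let keys := PySem.List.sorted
      ((fz.1.keys).filter (fun k => decide (0 < k) && decide (k < tgt))) (fun x => x) false
    outerB fz.1 keys.reverse keys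

-- ===== PRECONDITION & SPEC =====
-- Pre_ excludes exactly the inputs where the Python raises IndexError:
-- the empty grid (grid[0]) and grids with a row shorter than the first row (grid[i][j]).
def Pre_goodSubsetofBinaryMatrix (grid : List (List Int)) : Prop :=
  grid ≠ [] ∧ ∀ row ∈ grid, (grid.headI).length ≤ row.length
instance (grid : List (List Int)) : Decidable (Pre_goodSubsetofBinaryMatrix grid) := by
  unfold Pre_goodSubsetofBinaryMatrix; infer_instance

def pvWitness_goodSubsetofBinaryMatrix : List (List Int) := [[1, 0], [0, 1]]

def Spec_goodSubsetofBinaryMatrix (grid : List (List Int)) (out : List Int) : Prop := out = goodSubsetofBinaryMatrix_alt grid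
instance (grid : List (List Int)) (out : List Int) : Decidable (Spec_goodSubsetofBinaryMatrix grid out) := by unfold Spec_goodSubsetofBinaryMatrix; infer_instance

-- ===== CLAIM (what is proved, stated in full; the proofs are below) =====
def Claim_equal_goodSubsetofBinaryMatrix : Prop := ∀ (grid : List (List Int)), Dom_goodSubsetofBinaryMatrix grid → Pre_goodSubsetofBinaryMatrix grid → Spec_goodSubsetofBinaryMatrix grid (goodSubsetofBinaryMatrix grid)

-- ===== LEMMAS AND PROOFS =====

-- ---- pure bitwise facts on Nat ----
theorem land_decomp (a b : Nat) :
    a &&& b = 2 * ((a / 2) &&& (b / 2)) + (a % 2) * (b % 2) := by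
  have he : a % 2 * (b % 2) ≤ 1 := by
    rcases Nat.mod_two_eq_zero_or_one a with h | h <;>
      rcases Nat.mod_two_eq_zero_or_one b with h' | h' <;> simp [h, h']
  apply Nat.eq_of_testBit_eq
  intro i
  cases i with
  | zero =>
    simp only [Nat.testBit_zero]
    have h2 : (2 * (a / 2 &&& b / 2) + a % 2 * (b % 2)) % 2 = a % 2 * (b % 2) := by omega
    rw [h2]
    rcases Nat.mod_two_eq_zero_or_one a with h | h <;>
      rcases Nat.mod_two_eq_zero_or_one b with h' | h' <;> simp [h, h']
  | succ i =>
    conv_lhs => rw [Nat.testBit_land]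
    rw [Nat.testBit_succ a, Nat.testBit_succ b, ← Nat.testBit_land, Nat.testBit_succ]
    congr 1
    omega

-- the next value (s-1)&m of the submask descent is the largest submask of m below s
theorem submask_step (s m k : Nat) (hs : s &&& m = s) (hk : k &&& m = k) (hlt : k < s) :
    k ≤ (s - 1) &&& m := by
  induction s using Nat.strong_induction_on generalizing k m with
  | _ s ih =>
  rcases Nat.eq_zero_or_pos s with rfl | hpos
  · omega
  have hdk := land_decomp k m
  rw [hk] at hdk
  have hds := land_decomp s m
  rw [hs] at hds
  have hds1 := land_decomp (s - 1) m
  have hXk : k / 2 &&& m / 2 ≤ k / 2 := Nat.and_le_left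
  have hXs : s / 2 &&& m / 2 ≤ s / 2 := Nat.and_le_left
  have hmk : k % 2 * (m % 2) ≤ 1 := by
    rcases Nat.mod_two_eq_zero_or_one k with h | h <;>
      rcases Nat.mod_two_eq_zero_or_one m with h' | h' <;> simp [h, h']
  have hms : s % 2 * (m % 2) ≤ 1 := by
    rcases Nat.mod_two_eq_zero_or_one s with h | h <;>
      rcases Nat.mod_two_eq_zero_or_one m with h' | h' <;> simp [h, h']
  have hk2 : k / 2 &&& m / 2 = k / 2 := by omega
  have hs2 : s / 2 &&& m / 2 = s / 2 := by omega
  have hke : k % 2 * (m % 2) = k % 2 := by omega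
  have hse : s % 2 * (m % 2) = s % 2 := by omega
  rcases Nat.even_or_odd s with he | ho
  · have hsm : s % 2 = 0 := by rcases he with ⟨a, ha⟩; omega
    have hc : k / 2 < s / 2 := by omega
    have ihres : k / 2 ≤ (s / 2 - 1) &&& m / 2 := ih (s / 2) (by omega) (m / 2) (k / 2) hs2 hk2 hc
    have h1 : (s - 1) / 2 = s / 2 - 1 := by omega
    have h2 : (s - 1) % 2 = 1 := by omega
    rw [h1, h2] at hds1
    have hmm : k % 2 ≤ m % 2 := by
      rcases Nat.mod_two_eq_zero_or_one k with h | h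
      · omega
      · rw [h, one_mul] at hke; omega
    rw [one_mul] at hds1
    omega
  · have hsm : s % 2 = 1 := by rcases ho with ⟨a, ha⟩; omega
    rw [hsm, one_mul] at hse
    have h1 : (s - 1) / 2 = s / 2 := by omega
    have h2 : (s - 1) % 2 = 0 := by omega
    rw [h1, h2, hs2, zero_mul] at hds1
    omega

-- being a submask of the n-bit complement of l is being disjoint from l
theorem complement_iff (N l k : Nat) (hk : k < 2 ^ N) :
    (k &&& ((2 ^ N - 1) ^^^ l) = k ↔ k &&& l = 0) := by
  have hbk : ∀ i, k.testBit i = true → i < N := by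
    intro i hi
    by_contra h
    have : k < 2 ^ i := lt_of_lt_of_le hk (Nat.pow_le_pow_right (by omega) (by omega))
    rw [Nat.testBit_lt_two_pow this] at hi
    exact Bool.false_ne_true hi
  constructor
  · intro h
    apply Nat.eq_of_testBit_eq
    intro i
    have hbit := congrArg (fun x => Nat.testBit x i) h
    simp only [Nat.testBit_land, Nat.testBit_xor, Nat.testBit_two_pow_sub_one] at hbit ⊢
    simp only [Nat.zero_testBit]
    cases hki : k.testBit i with
    | false => simp
    | true =>
      have hiN := hbk i hki
      simp [hki, hiN] at hbit
      simp [hbit]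
  · intro h
    apply Nat.eq_of_testBit_eq
    intro i
    have hbit := congrArg (fun x => Nat.testBit x i) h
    simp only [Nat.testBit_land, Nat.testBit_xor, Nat.testBit_two_pow_sub_one, Nat.zero_testBit] at hbit ⊢
    cases hki : k.testBit i with
    | false => simp [hki]
    | true =>
      have hiN := hbk i hki
      simp [hki] at hbit
      simp [hiN, hbit]

-- ---- Int wrappers ----
theorem bw_idem (a b : Int) (ha : 0 ≤ a) (hb : 0 ≤ b) :
    PySem.Int.band (PySem.Int.band a b) b = PySem.Int.band a b := by
  lift a to Nat using ha
  lift b to Nat using hb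
  rw [PySem.Int.band_natCast, PySem.Int.band_natCast, Nat.land_assoc]
  congr 1
  apply Nat.eq_of_testBit_eq
  intro i
  simp [Nat.testBit_land, Bool.and_assoc]

theorem bw_le (k rstate : Int) (hk : 0 ≤ k) (hr : 0 ≤ rstate)
    (h : PySem.Int.band k rstate = k) : k ≤ rstate := by
  calc k = PySem.Int.band k rstate := h.symm
    _ = PySem.Int.band rstate k := PySem.Int.band_comm _ _
    _ ≤ rstate := band_le_left k hr

theorem bw_step_int (rstate s k : Int) (hr : 0 ≤ rstate) (hs : 0 < s)
    (hssub : PySem.Int.band s rstate = s) (hk : 0 < k)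
    (hksub : PySem.Int.band k rstate = k) (hlt : k < s) :
    k ≤ PySem.Int.band (s - 1) rstate := by
  lift rstate to Nat using hr with rN
  lift k to Nat using (by omega : (0:Int) ≤ k) with kN
  lift s to Nat using (by omega : (0:Int) ≤ s) with sN
  have h1 : ((sN:Int) - 1) = ((sN - 1 : Nat) : Int) := by omega
  rw [h1, PySem.Int.band_natCast]
  rw [PySem.Int.band_natCast] at hssub hksub
  have hs' : sN &&& rN = sN := by exact_mod_cast hssub
  have hk' : kN &&& rN = kN := by exact_mod_cast hksub
  have := submask_step sN rN kN hs' hk' (by exact_mod_cast hlt)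
  exact_mod_cast this

-- ---- characterization of A's submask descent ----
theorem innerA_none_iff (states : PySem.Dict Int (List Int)) (rstate : Int) (hr : 0 ≤ rstate) :
    ∀ s : Int, 0 ≤ s → PySem.Int.band s rstate = s →
    (innerA states rstate s = none ↔
      ∀ k : Int, 0 < k → PySem.Int.band k rstate = k → k ≤ s → states.getD k [] = []) := by
  suffices H : ∀ t : Nat, ∀ s : Int, s.toNat ≤ t → 0 ≤ s → PySem.Int.band s rstate = s →
      (innerA states rstate s = none ↔
        ∀ k : Int, 0 < k → PySem.Int.band k rstate = k → k ≤ s → states.getD k [] = []) by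
    exact fun s hs hsub => H s.toNat s le_rfl hs hsub
  intro t
  induction t with
  | zero =>
    intro s ht hs hsub
    have hs0 : s = 0 := by omega
    subst hs0
    rw [innerA]
    simp only [le_refl, if_true]
    constructor
    · intro _ k hk0 _ hkle
      exact absurd (lt_of_lt_of_le hk0 hkle) (lt_irrefl 0)
    · intro _; trivial
  | succ t iht =>
    intro s ht hs hsub
    rw [innerA]
    by_cases hle : s ≤ 0
    · simp only [if_pos hle]
      constructor
      · intro _ k hk0 _ hkle
        exact absurd (lt_of_lt_of_le hk0 hkle) (by omega)
      · intro _; trivial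
    · simp only [if_neg hle]
      have hspos : 0 < s := by omega
      cases hm : states.getD s [] with
      | cons x xs =>
        simp only []
        constructor
        · intro h; exact absurd h (by simp)
        · intro hall
          have := hall s hspos hsub le_rfl
          rw [this] at hm
          exact absurd hm (by simp)
      | nil =>
        simp only []
        have h1 : PySem.Int.band (s - 1) rstate ≤ s - 1 := band_le_left rstate (by omega)
        have h2 : 0 ≤ PySem.Int.band (s - 1) rstate :=
          PySem.Int.band_nonneg_of_nonneg_left rstate (by omega)
        have h3 : PySem.Int.band (PySem.Int.band (s - 1) rstate) rstate
            = PySem.Int.band (s - 1) rstate := bw_idem (s - 1) rstate (by omega) hr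
        rw [iht (PySem.Int.band (s - 1) rstate) (by omega) h2 h3]
        constructor
        · intro hall k hk0 hks hkle
          by_cases hks' : k = s
          · subst hks'; exact hm
          · exact hall k hk0 hks
              (bw_step_int rstate s k hr hspos hsub hk0 hks (by omega))
        · intro hall k hk0 hks hkle
          exact hall k hk0 hks (by omega)

theorem innerA_some (states : PySem.Dict Int (List Int)) (rstate : Int) (hr : 0 ≤ rstate) :
    ∀ s : Int, 0 ≤ s → PySem.Int.band s rstate = s → ∀ x,
    innerA states rstate s = some x →
    ∃ k : Int, 0 < k ∧ PySem.Int.band k rstate = k ∧ k ≤ s ∧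
      (states.getD k []).head? = some x ∧
      ∀ k' : Int, k < k' → PySem.Int.band k' rstate = k' → k' ≤ s → states.getD k' [] = [] := by
  suffices H : ∀ t : Nat, ∀ s : Int, s.toNat ≤ t → 0 ≤ s → PySem.Int.band s rstate = s → ∀ x,
      innerA states rstate s = some x →
      ∃ k : Int, 0 < k ∧ PySem.Int.band k rstate = k ∧ k ≤ s ∧
        (states.getD k []).head? = some x ∧
        ∀ k' : Int, k < k' → PySem.Int.band k' rstate = k' → k' ≤ s → states.getD k' [] = [] by
    exact fun s hs hsub => H s.toNat s le_rfl hs hsub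
  intro t
  induction t with
  | zero =>
    intro s ht hs hsub x hx
    have hs0 : s = 0 := by omega
    subst hs0
    rw [innerA] at hx
    simp at hx
  | succ t iht =>
    intro s ht hs hsub x hx
    rw [innerA] at hx
    by_cases hle : s ≤ 0
    · rw [if_pos hle] at hx; exact absurd hx (by simp)
    · rw [if_neg hle] at hx
      have hspos : 0 < s := by omega
      cases hm : states.getD s [] with
      | cons y ys =>
        rw [hm] at hx
        refine ⟨s, hspos, hsub, le_rfl, ?_, ?_⟩
        · have : y = x := by simpa using hx
          simp [hm, this]
        · intro k' hk' _ hk'le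
          omega
      | nil =>
        rw [hm] at hx
        have h1 : PySem.Int.band (s - 1) rstate ≤ s - 1 := band_le_left rstate (by omega)
        have h2 : 0 ≤ PySem.Int.band (s - 1) rstate :=
          PySem.Int.band_nonneg_of_nonneg_left rstate (by omega)
        have h3 : PySem.Int.band (PySem.Int.band (s - 1) rstate) rstate
            = PySem.Int.band (s - 1) rstate := bw_idem (s - 1) rstate (by omega) hr
        obtain ⟨k, hk0, hks, hkle, hkh, hkmax⟩ := iht _ (by omega) h2 h3 x hx
        refine ⟨k, hk0, hks, by omega, hkh, ?_⟩
        intro k' hkk' hk'sub hk'le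
        by_cases hk's : k' = s
        · subst hk's; exact hm
        · exact hkmax k' hkk' hk'sub
            (bw_step_int rstate s k' hr hspos hsub (by omega) hk'sub (by omega))

-- ---- B's inner scan is a find? ----
theorem innerB_eq_find? (first : PySem.Dict Int Int) (l : Int) :
    ∀ rl, innerB first l rl =
      (rl.find? (fun r => PySem.Int.band l r == 0)).map
        (fun r => PySem.List.sorted [first.getD l 0, first.getD r 0] (fun x => x) false) := by
  intro rl
  induction rl with
  | nil => rfl
  | cons r rs ih =>
    by_cases h : PySem.Int.band l r = 0
    · rw [innerB, List.find?_cons_of_pos (by simpa using h), if_pos h]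
      rfl
    · rw [innerB, List.find?_cons_of_neg (by simpa using h), if_neg h]
      exact ih

-- find? on a strictly descending list returns the greatest satisfying element
theorem find?_desc_some_iff (l : List Int) (p : Int → Bool)
    (h : l.Pairwise (fun a b => b < a)) (a : Int) :
    l.find? p = some a ↔ a ∈ l ∧ p a = true ∧ ∀ b ∈ l, p b = true → b ≤ a := by
  induction l with
  | nil => simp
  | cons x xs ih =>
    rw [List.pairwise_cons] at h
    rw [List.find?]
    cases hx : p x with
    | true =>
      simp only [List.mem_cons]
      constructor
      · intro he
        have hxa : x = a := by exact Option.some.inj he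
        subst hxa
        refine ⟨Or.inl rfl, hx, ?_⟩
        rintro b (rfl | hb) _
        · exact le_refl _
        · exact le_of_lt (h.1 b hb)
      · rintro ⟨ha, hpa, hmax⟩
        rcases ha with rfl | ha
        · rfl
        · have := hmax x (Or.inl rfl) hx
          have := h.1 a ha
          omega
    | false =>
      rw [ih h.2]
      simp only [List.mem_cons]
      constructor
      · rintro ⟨ha, hpa, hmax⟩
        exact ⟨Or.inr ha, hpa, by
          rintro b (rfl | hb) hpb
          · rw [hx] at hpb; exact absurd hpb (by simp)
          · exact hmax b hb hpb⟩
      · rintro ⟨ha, hpa, hmax⟩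
        rcases ha with rfl | ha
        · rw [hx] at hpa; exact absurd hpa (by simp)
        · exact ⟨ha, hpa, fun b hb hpb => hmax b (Or.inr hb) hpb⟩

-- skipping absent states: outerA only looks at present keys
theorem outerA_filter (states : PySem.Dict Int (List Int)) (ss : Int) :
    ∀ l, outerA states ss (l.filter (fun k => !(states.getD k [] == []))) = outerA states ss l := by
  intro l
  induction l with
  | nil => rfl
  | cons k rest ih =>
    cases h : states.getD k [] with
    | nil =>
      rw [List.filter_cons]
      simp only [h]
      simpa [outerA, h] using ih
    | cons x xs =>
      rw [List.filter_cons]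
      have hne : ((x :: xs : List Int) == []) = false := by simp
      simp only [h, hne, Bool.not_false, if_true]
      simp only [outerA, h]
      cases innerA states (PySem.Int.bxor ss k) (PySem.Int.bxor ss k) with
      | some si => rfl
      | none => exact ih

-- first-wins dict fold: lookup is the first matching pair
theorem firstFold_get? (c : Int) :
    ∀ (l : List (Int × Int)) (d : PySem.Dict Int Int),
    (l.foldl (fun d p => if d.contains p.1 then d else d.insert p.1 p.2) d).get? c
      = (d.get? c).or ((l.find? (fun p => p.1 == c)).map (·.2)) := by
  intro l
  induction l with
  | nil => intro d; simp
  | cons p l ih =>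
    intro d
    rw [List.foldl_cons, ih, List.find?]
    by_cases hc : p.1 = c
    · subst hc
      simp only [beq_self_eq_true]
      cases hcont : d.contains p.1 with
      | true =>
        obtain ⟨v, hv⟩ : ∃ v, d.get? p.1 = some v := by
          have := PySem.Dict.contains_eq_isSome_get? d p.1
          rw [hcont] at this
          cases h : d.get? p.1 with
          | none => rw [h] at this; simp at this
          | some v => exact ⟨v, rfl⟩
        simp [hcont, hv]
      | false =>
        have hnone : d.get? p.1 = none := (PySem.Dict.get?_eq_none_iff_contains d p.1).2 hcont
        simp [hcont, hnone, PySem.Dict.get?_insert_self]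
    · have hbeq : (p.1 == c) = false := by simp [hc]
      simp only [hbeq]
      cases hcont : d.contains p.1 with
      | true => simp [hcont]
      | false =>
        simp only [hcont, Bool.false_eq_true, if_false]
        rw [PySem.Dict.get?_insert_of_ne _ _ (fun h => hc h.symm)]

theorem firstFold_nodup :
    ∀ (l : List (Int × Int)) (d : PySem.Dict Int Int), d.keys.Nodup →
    (l.foldl (fun d p => if d.contains p.1 then d else d.insert p.1 p.2) d).keys.Nodup := by
  intro l
  induction l with
  | nil => intro d h; exact h
  | cons p l ih =>
    intro d h
    rw [List.foldl_cons]
    cases hcont : d.contains p.1 with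
    | true => simpa [hcont] using ih d h
    | false =>
      simp only [hcont, Bool.false_eq_true, if_false]
      exact ih _ (PySem.Dict.nodup_keys_insert d p.1 p.2 h)

-- ---- the main branch, abstracted over the two dictionaries ----
theorem branch_eq (states : PySem.Dict Int (List Int)) (first : PySem.Dict Int Int) (N : Nat)
    (hrel : ∀ c, (states.getD c []).head? = first.get? c)
    (h0 : states.getD 0 [] = [])
    (hnd : first.keys.Nodup) :
    outerA states ((1 <<< N : Int) - 1) (PySem.List.pyRange 0 (1 <<< N) 1)
      = outerB first
          (PySem.List.sorted ((first.keys).filter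
            (fun k => decide (0 < k) && decide (k < (1 <<< N : Int)))) (fun x => x) false).reverse
          (PySem.List.sorted ((first.keys).filter
            (fun k => decide (0 < k) && decide (k < (1 <<< N : Int)))) (fun x => x) false) := by
  have htgt : (1 <<< N : Int) = ((2 ^ N : Nat) : Int) := by
    rw [Nat.one_shiftLeft]
  have hpow1 : (1 : Nat) ≤ 2 ^ N := Nat.one_le_two_pow
  set kl : List Int :=
    ((List.range (2 ^ N)).map (fun k : Nat => (k : Int))).filter
      (fun k => (first.get? k).isSome) with hkl
  have hmem_kl : ∀ a : Int, a ∈ kl ↔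
      (∃ kN : Nat, kN < 2 ^ N ∧ a = (kN : Int)) ∧ (first.get? a).isSome = true := by
    intro a
    rw [hkl, List.mem_filter, List.mem_map]
    constructor
    · rintro ⟨⟨kN, hkN, rfl⟩, h2⟩
      exact ⟨⟨kN, List.mem_range.1 hkN, rfl⟩, h2⟩
    · rintro ⟨⟨kN, hkN, rfl⟩, h2⟩
      exact ⟨⟨kN, List.mem_range.2 hkN, rfl⟩, h2⟩
  have hget0 : first.get? 0 = none := by rw [← hrel 0, h0]; rfl
  have hpos_kl : ∀ a : Int, a ∈ kl → 0 < a := by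
    intro a ha
    obtain ⟨⟨kN, hkN, rfl⟩, hsome⟩ := (hmem_kl _).1 ha
    rcases Nat.eq_zero_or_pos kN with rfl | h
    · rw [Nat.cast_zero, hget0] at hsome; simp at hsome
    · exact_mod_cast h
  have hlt_kl : ∀ a : Int, a ∈ kl → a < (1 <<< N : Int) := by
    intro a ha
    obtain ⟨⟨kN, hkN, rfl⟩, _⟩ := (hmem_kl _).1 ha
    rw [htgt]; exact_mod_cast hkN
  have hpres_kl : ∀ a : Int, a ∈ kl → states.getD a [] ≠ [] := by
    intro a ha h
    obtain ⟨_, hsome⟩ := (hmem_kl _).1 ha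
    rw [← hrel a, h] at hsome; simp at hsome
  have hklnd : kl.Nodup := by
    rw [hkl]
    exact ((List.nodup_range).map (fun a b h => by exact_mod_cast h)).filter _
  have hklpw : List.Pairwise (fun a b : Int => a < b) kl := by
    rw [hkl]
    exact List.Pairwise.sublist List.filter_sublist
      (List.Pairwise.map (fun k : Nat => (k : Int)) (fun a b h => Int.ofNat_lt.mpr h)
        List.pairwise_lt_range)
  -- the sorted key list of B is exactly kl
  have hsortkl : PySem.List.sorted ((first.keys).filter
      (fun k => decide (0 < k) && decide (k < (1 <<< N : Int)))) (fun x => x) false = kl := by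
    apply PySem.List.sorted_eq_of_perm_of_pairwise_lt
    · rw [List.perm_ext_iff_of_nodup hklnd (hnd.filter _)]
      intro a
      constructor
      · intro ha
        obtain ⟨⟨kN, hkN, hcast⟩, hsome⟩ := (hmem_kl _).1 ha
        rw [List.mem_filter]
        refine ⟨?_, ?_⟩
        · rw [← PySem.Dict.contains_iff_mem_keys, PySem.Dict.contains_eq_isSome_get?]
          exact hsome
        · simp only [Bool.and_eq_true, decide_eq_true_eq]
          exact ⟨hpos_kl _ ha, hlt_kl _ ha⟩
      · intro ha
        rw [List.mem_filter] at ha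
        obtain ⟨hker, hba⟩ := ha
        simp only [Bool.and_eq_true, decide_eq_true_eq] at hba
        have hsome : (first.get? a).isSome = true := by
          rw [← PySem.Dict.contains_eq_isSome_get?, PySem.Dict.contains_iff_mem_keys]
          exact hker
        apply (hmem_kl a).2
        refine ⟨⟨a.toNat, ?_, ?_⟩, hsome⟩
        · rw [htgt] at hba; omega
        · omega
    · exact hklpw
  rw [hsortkl]
  -- A's range list, with the absent states skipped, is kl as well
  have hA : PySem.List.pyRange 0 (1 <<< N) 1 = (List.range (2 ^ N)).map (fun k : Nat => (k : Int)) := by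
    rw [htgt, PySem.List.pyRange_zero_natCast]
  have hpres : ∀ k : Int, (!(states.getD k [] == [])) = (first.get? k).isSome := by
    intro k
    rw [← hrel k]
    cases states.getD k [] <;> simp
  rw [hA, ← outerA_filter states ((1 <<< N : Int) - 1) ((List.range (2 ^ N)).map (fun k : Nat => (k : Int)))]
  have hflt : ((List.range (2 ^ N)).map (fun k : Nat => (k : Int))).filter
      (fun k => !(states.getD k [] == [])) = kl := by
    rw [hkl]
    exact List.filter_congr (fun x _ => hpres x)
  rw [hflt]
  -- descending pairwise on kl.reverse
  have hdesc : kl.reverse.Pairwise (fun a b => b < a) := by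
    rw [List.pairwise_reverse]
    exact hklpw
  -- pointwise equality of the two outer loops
  have hcore : ∀ ls, (∀ x ∈ ls, x ∈ kl) →
      outerA states ((1 <<< N : Int) - 1) ls = outerB first kl.reverse ls := by
    intro ls
    induction ls with
    | nil => intro _; rfl
    | cons L rest ih =>
      intro hmem
      have hLkl := hmem L (List.mem_cons_self ..)
      obtain ⟨⟨lN, hlN, hLcast⟩, hLsome⟩ := (hmem_kl L).1 hLkl
      have hLne : states.getD L [] ≠ [] := hpres_kl L hLkl
      cases hL : states.getD L [] with
      | nil => exact absurd hL hLne
      | cons li tl =>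
        have hLget : first.get? L = some li := by rw [← hrel L, hL]; rfl
        have hLgetD : first.getD L 0 = li := by
          rw [PySem.Dict.getD_eq_get?_getD, hLget]; rfl
        -- the complement state
        have hr0 : 0 ≤ PySem.Int.bxor ((1 <<< N : Int) - 1) L := by
          rw [hLcast, htgt]
          rw [show ((2 ^ N : Nat) : Int) - 1 = ((2 ^ N - 1 : Nat) : Int) by omega]
          rw [PySem.Int.bxor_natCast]
          exact Int.natCast_nonneg _
        have hrsN : PySem.Int.bxor ((1 <<< N : Int) - 1) L = (((2 ^ N - 1) ^^^ lN : Nat) : Int) := by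
          rw [hLcast, htgt]
          rw [show ((2 ^ N : Nat) : Int) - 1 = ((2 ^ N - 1 : Nat) : Int) by omega]
          rw [PySem.Int.bxor_natCast]
        have hrN_lt : (2 ^ N - 1) ^^^ lN < 2 ^ N := Nat.xor_lt_two_pow (by omega) hlN
        -- candidate-set correspondence
        have hcand : ∀ k : Int,
            (0 < k ∧ PySem.Int.band k (PySem.Int.bxor ((1 <<< N : Int) - 1) L) = k ∧
              k ≤ PySem.Int.bxor ((1 <<< N : Int) - 1) L ∧ states.getD k [] ≠ []) ↔
            (k ∈ kl.reverse ∧ PySem.Int.band L k = 0) := by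
          intro k
          constructor
          · rintro ⟨hk0, hksub, hkle, hkne⟩
            have hkN : ∃ kN : Nat, k = (kN : Int) := ⟨k.toNat, by omega⟩
            obtain ⟨kN, rfl⟩ := hkN
            rw [hrsN] at hksub hkle
            have hkN_le : kN ≤ (2 ^ N - 1) ^^^ lN := by exact_mod_cast hkle
            have hkN_lt : kN < 2 ^ N := by omega
            have hsubN : kN &&& ((2 ^ N - 1) ^^^ lN) = kN := by
              rw [PySem.Int.band_natCast] at hksub
              exact_mod_cast hksub
            have hdisj : kN &&& lN = 0 := (complement_iff N lN kN hkN_lt).1 hsubN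
            have hsome : (first.get? (kN : Int)).isSome = true := by
              rw [← hrel]
              cases hg : states.getD (kN : Int) [] with
              | nil => exact absurd hg hkne
              | cons a l => rfl
            refine ⟨List.mem_reverse.2 ((hmem_kl _).2 ⟨⟨kN, hkN_lt, rfl⟩, hsome⟩), ?_⟩
            rw [hLcast, PySem.Int.band_natCast]
            rw [Nat.land_comm] at hdisj
            exact_mod_cast hdisj
          · rintro ⟨hkrev, hkdisj⟩
            have hkkl := List.mem_reverse.1 hkrev
            obtain ⟨⟨kN, hkN_lt, rfl⟩, hsome⟩ := (hmem_kl _).1 hkkl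
            have hk0 : (0 : Int) < kN := hpos_kl _ hkkl
            have hdisjN : lN &&& kN = 0 := by
              rw [hLcast, PySem.Int.band_natCast] at hkdisj
              exact_mod_cast hkdisj
            have hsubN : kN &&& ((2 ^ N - 1) ^^^ lN) = kN :=
              (complement_iff N lN kN hkN_lt).2 (by rw [Nat.land_comm]; exact hdisjN)
            have hksub : PySem.Int.band (kN : Int) (PySem.Int.bxor ((1 <<< N : Int) - 1) L) = kN := by
              rw [hrsN, PySem.Int.band_natCast]
              exact_mod_cast hsubN
            refine ⟨hk0, hksub, ?_, hpres_kl _ hkkl⟩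
            exact bw_le _ _ (by omega) hr0 hksub
        -- the two inner loops agree
        have hAB : innerB first L kl.reverse =
            (innerA states (PySem.Int.bxor ((1 <<< N : Int) - 1) L)
              (PySem.Int.bxor ((1 <<< N : Int) - 1) L)).map
              (fun si => PySem.List.sorted [li, si] (fun x => x) false) := by
          rw [innerB_eq_find? first L kl.reverse]
          cases hf : kl.reverse.find? (fun r => PySem.Int.band L r == 0) with
          | none =>
            rw [List.find?_eq_none] at hf
            have hnone : innerA states (PySem.Int.bxor ((1 <<< N : Int) - 1) L)
                (PySem.Int.bxor ((1 <<< N : Int) - 1) L) = none := by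
              rw [innerA_none_iff states _ hr0 _ hr0 (PySem.Int.band_self _)]
              intro k hk0 hsub hkle
              by_contra hne
              have hk := (hcand k).1 ⟨hk0, hsub, hkle, hne⟩
              exact hf k hk.1 (by simp [hk.2])
            rw [hnone]; rfl
          | some r =>
            obtain ⟨hrmem, hrp, hrmax⟩ := (find?_desc_some_iff _ _ hdesc r).1 hf
            have hrP : PySem.Int.band L r = 0 := by simpa using hrp
            have hrcand := (hcand r).2 ⟨hrmem, hrP⟩
            cases hi : innerA states (PySem.Int.bxor ((1 <<< N : Int) - 1) L)
                (PySem.Int.bxor ((1 <<< N : Int) - 1) L) with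
            | none =>
              exfalso
              rw [innerA_none_iff states _ hr0 _ hr0 (PySem.Int.band_self _)] at hi
              exact hrcand.2.2.2 (hi r hrcand.1 hrcand.2.1 hrcand.2.2.1)
            | some x =>
              obtain ⟨k, hk0, hksub, hkle, hkhead, hkmax⟩ :=
                innerA_some states _ hr0 _ hr0 (PySem.Int.band_self _) x hi
              have hkpres : states.getD k [] ≠ [] := by
                intro h; rw [h] at hkhead; exact absurd hkhead (by simp)
              have hkin := (hcand k).1 ⟨hk0, hksub, hkle, hkpres⟩
              have hkr : k ≤ r := hrmax k hkin.1 (by simp [hkin.2])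
              have hrk : r = k := by
                by_contra hne
                exact hrcand.2.2.2
                  (hkmax r (lt_of_le_of_ne hkr (fun h => hne h.symm)) hrcand.2.1 hrcand.2.2.1)
              simp only [Option.map_some]
              congr 1
              rw [hrk, hLgetD]
              have : first.getD k 0 = x := by
                rw [PySem.Dict.getD_eq_get?_getD, ← hrel k, hkhead]; rfl
              rw [this]
        simp only [outerA, outerB, hL, hAB]
        cases innerA states (PySem.Int.bxor ((1 <<< N : Int) - 1) L)
            (PySem.Int.bxor ((1 <<< N : Int) - 1) L) with
        | some si => rfl
        | none => exact ih (fun x hx => hmem x (List.mem_cons_of_mem _ hx))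
  exact hcore kl (fun x h => h)

-- ---- the Python enumerate as a range map ----
theorem enum_eq {α : Type} (d : α) :
    ∀ (xs : List α) (s : Int), PySem.List.enumerate xs s
      = (List.range xs.length).map (fun (k : Nat) => (s + (k : Int), xs.getD k d)) := by
  intro xs
  induction xs with
  | nil => intro s; rfl
  | cons x t ih =>
    intro s
    show (s, x) :: PySem.List.enumerate t (s + 1) = _
    rw [ih (s + 1), List.length_cons, List.range_succ_eq_map, List.map_cons, List.map_map]
    simp only [Nat.cast_zero, add_zero, List.getD_cons_zero]
    congr 1
    apply List.map_congr_left
    intro k _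
    simp only [Function.comp_apply, List.getD_cons_succ]
    congr 1
    push_cast
    ring


-- assembling the if-branches once both dictionaries are related
theorem glue (sd : PySem.Dict Int (List Int)) (fz : PySem.Dict Int Int × List Int) (N : Nat)
    (hrel : ∀ c, (sd.getD c []).head? = fz.1.get? c)
    (hzeq : fz.2 = sd.getD 0 [])
    (hnd : fz.1.keys.Nodup) :
    (if sd.getD 0 [] ≠ [] then sd.getD 0 []
     else outerA sd ((1 <<< N : Int) - 1) (PySem.List.pyRange 0 (1 <<< N) 1))
    = (if fz.2 ≠ [] then fz.2
       else outerB fz.1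
        (PySem.List.sorted ((fz.1.keys).filter
          (fun k => decide (0 < k) && decide (k < (1 <<< N : Int)))) (fun x => x) false).reverse
        (PySem.List.sorted ((fz.1.keys).filter
          (fun k => decide (0 < k) && decide (k < (1 <<< N : Int)))) (fun x => x) false)) := by
  by_cases hz0 : sd.getD 0 [] = []
  · rw [if_neg (by simp [hz0]), if_neg (by simp [hzeq, hz0])]
    exact branch_eq sd fz.1 N hrel hz0 hnd
  · rw [if_pos hz0, if_pos (by rw [hzeq]; exact hz0)]
    exact hzeq.symm

-- ---- the main equivalence, no precondition needed ----
theorem ports_eq (grid : List (List Int)) :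
    goodSubsetofBinaryMatrix grid = goodSubsetofBinaryMatrix_alt grid := by
  unfold goodSubsetofBinaryMatrix goodSubsetofBinaryMatrix_alt
  simp only [PySem.List.len_eq, Int.toNat_natCast]
  set N := (PySem.List.pyGetD grid 0 []).length with hN
  set sd := List.foldl
      (fun d i => d.modify (rowMask (N : Int) (PySem.List.pyGetD grid i [])) [] fun x => x ++ [i])
      PySem.Dict.empty (PySem.List.pyRange 0 (grid.length : Int)) with hsd
  set bz := List.foldl
      (fun (p : PySem.Dict Int Int × List Int) (ir : Int × List Int) =>
        (if p.1.contains (rowMask (N : Int) ir.2) = true then p.1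
         else p.1.insert (rowMask (N : Int) ir.2) ir.1,
         if rowMask (N : Int) ir.2 = 0 then p.2 ++ [ir.1] else p.2))
      (PySem.Dict.empty, ([] : List Int)) (PySem.List.enumerate grid) with hbz
  set ml : List (Int × Int) := (List.range grid.length).map
      (fun k : Nat => (rowMask (N : Int) (grid.getD k []), (k : Int))) with hml
  have hSfold : sd = ml.foldl (fun d p => d.modify p.1 [] (· ++ [p.2])) PySem.Dict.empty := by
    rw [hsd, PySem.List.pyRange_zero_natCast, List.foldl_map, hml, List.foldl_map]
    simp only [PySem.List.pyGetD_natCast]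
  have hstc : ∀ c, sd.getD c [] = (ml.filter (fun p => p.1 == c)).map (fun p => p.2) := by
    intro c
    rw [hSfold, PySem.Dict.getD_foldl_modify_append]
    simp [PySem.Dict.getD_empty]
  have hBfold : bz = (ml.foldl (fun d p => if d.contains p.1 then d else d.insert p.1 p.2)
        PySem.Dict.empty,
      ((List.range grid.length).filter
        (fun k => decide (rowMask (N : Int) (grid.getD k []) = 0))).map (fun k : Nat => (k : Int))) := by
    rw [hbz, enum_eq ([] : List Int) grid 0]
    simp only [zero_add]
    rw [List.foldl_map]
    rw [PySem.List.foldl_prod_mk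
      (f := fun (d : PySem.Dict Int Int) (k : Nat) =>
        if d.contains (rowMask (N : Int) (grid.getD k [])) = true then d
        else d.insert (rowMask (N : Int) (grid.getD k [])) (k : Int))
      (g := fun (z : List Int) (k : Nat) =>
        if rowMask (N : Int) (grid.getD k []) = 0 then z ++ [(k : Int)] else z)]
    congr 1
    · rw [hml, List.foldl_map]
    · rw [PySem.List.foldl_append_ite
        (p := fun k : Nat => rowMask (N : Int) (grid.getD k []) = 0)
        (f := fun k : Nat => (k : Int))]
      simp
  have hzeq : bz.2 = sd.getD 0 [] := by
    rw [hBfold, hstc 0, hml, List.filter_map, List.map_map]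
    congr 1
  have hrel : ∀ c, (sd.getD c []).head? = bz.1.get? c := by
    intro c
    rw [hstc c, hBfold, firstFold_get? c ml PySem.Dict.empty]
    simp only [PySem.Dict.get?_empty, Option.none_or]
    rw [List.head?_map, List.head?_filter]
  have hnd : bz.1.keys.Nodup := by
    rw [hBfold]
    exact firstFold_nodup ml PySem.Dict.empty PySem.Dict.nodup_keys_empty
  exact glue sd bz N hrel hzeq hnd

-- ===== VERDICT (by name: the statement is the Claim_ definition above) =====
theorem goodSubsetofBinaryMatrix_spec : Claim_equal_goodSubsetofBinaryMatrix := by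
  intro grid _ _
  unfold Spec_goodSubsetofBinaryMatrix
  exact ports_eq grid
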